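-- pv_equiv track=rewrite | github.com/Haesun-Pyeon/CodingTestPractice | 프로그래머스/0/181837. 커피 심부름/커피 심부름.py | solution
-- ===== SOURCE A (Python) =====
-- def solution(order):
--     answer = 0
--     for o in order:
--         if 'latte' in o:
--             answer += 5000
--         else:
--             answer += 4500
--     return answer
-- ===== SOURCE B (Python) =====
-- def solution(order):
--     if not order:
--         return 0
--     if len(order) == 1:
--         return 5000 if 'latte' in order[0] else 4500
--     mid = len(order) // 2
--     return solution(order[:mid]) + solution(order[mid:])
-- ===== Notes on version B (the rewrite author's own statement) =====
-- stated objective: alternative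
-- what changed: Replaces the imperative accumulator loop with a divide-and-conquer recursion: split the order list in half, price each half recursively (base cases: empty list and a single order), and add the two subtotals.
import Mathlib
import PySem

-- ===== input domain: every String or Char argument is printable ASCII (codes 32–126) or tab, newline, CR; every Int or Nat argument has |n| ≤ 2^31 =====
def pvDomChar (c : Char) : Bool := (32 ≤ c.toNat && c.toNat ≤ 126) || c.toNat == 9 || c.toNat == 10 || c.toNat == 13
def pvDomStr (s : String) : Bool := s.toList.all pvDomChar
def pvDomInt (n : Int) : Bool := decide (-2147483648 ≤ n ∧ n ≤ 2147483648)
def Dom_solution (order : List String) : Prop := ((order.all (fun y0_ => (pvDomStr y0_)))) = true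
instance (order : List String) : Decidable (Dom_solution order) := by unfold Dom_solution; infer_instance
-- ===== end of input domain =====

-- B replaces A's accumulator loop by a divide-and-conquer recursion: split in half, price each
-- half recursively, add the subtotals (objective: alternative).

-- ===== PORT A =====
def solution (order : List String) : Int :=
  order.foldl (fun answer o => if PySem.Str.isIn "latte" o then answer + 5000 else answer + 4500) 0

-- ===== PORT B =====
-- used by solution_alt's termination proof (cited in decreasing_by)
theorem len_floordiv_two (n : Nat) : PySem.Int.floordiv (n : Int) 2 = ((n / 2 : Nat) : Int) := by
  unfold PySem.Int.floordiv
  rw [Int.fdiv_eq_ediv]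
  norm_num

def solution_alt (order : List String) : Int :=
  if order = [] then 0
  else if order.length = 1 then
    if PySem.Str.isIn "latte" ((PySem.List.pyGet? order 0).getD "") then 5000 else 4500
  else
    let mid := PySem.Int.floordiv order.length 2
    solution_alt (PySem.List.slice order none (some mid))
      + solution_alt (PySem.List.slice order (some mid) none)
termination_by order.length
decreasing_by
  · rename_i h0 h1
    have h2 : 2 ≤ order.length := by
      rcases order with _ | ⟨x, _ | ⟨y, ys⟩⟩ <;> simp_all
    rw [len_floordiv_two, PySem.List.slice_to_natCast]
    simp only [List.length_take]
    omega
  · rename_i h0 h1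
    have h2 : 2 ≤ order.length := by
      rcases order with _ | ⟨x, _ | ⟨y, ys⟩⟩ <;> simp_all
    rw [len_floordiv_two, PySem.List.slice_from_natCast]
    simp only [List.length_drop]
    omega

-- ===== PRECONDITION & SPEC =====
def Spec_solution (order : List String) (out : Int) : Prop := out = solution_alt order
instance (order : List String) (out : Int) : Decidable (Spec_solution order out) := by unfold Spec_solution; infer_instance

-- ===== CLAIM (what is proved, stated in full; the proofs are below) =====
def Claim_equal_solution : Prop := ∀ (order : List String), Dom_solution order → Spec_solution order (solution order)

-- ===== LEMMAS AND PROOFS =====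
def priceSum (xs : List String) : Int :=
  (xs.map (fun o => if PySem.Str.isIn "latte" o then (5000 : Int) else 4500)).sum

theorem solution_alt_eq_priceSum (order : List String) : solution_alt order = priceSum order := by
  generalize hlen : order.length = n
  induction n using Nat.strong_induction_on generalizing order with
  | _ n ih =>
    subst hlen
    rw [solution_alt]
    by_cases h0 : order = []
    · simp [h0, priceSum]
    · rw [if_neg h0]
      by_cases h1 : order.length = 1
      · obtain ⟨o, rfl⟩ : ∃ o, order = [o] := by
          rcases order with _ | ⟨x, _ | ⟨y, ys⟩⟩ <;> simp_all
        rw [if_pos h1]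
        simp [priceSum, PySem.List.pyGet?, PySem.List.pyIdx?]
      · rw [if_neg h1]
        have h2 : 2 ≤ order.length := by
          rcases order with _ | ⟨x, _ | ⟨y, ys⟩⟩ <;> simp_all
        simp only [len_floordiv_two, PySem.List.slice_to_natCast, PySem.List.slice_from_natCast]
        rw [ih _ (by simp; omega) _ rfl, ih _ (by simp; omega) _ rfl]
        unfold priceSum
        rw [← List.sum_append, ← List.map_append, List.take_append_drop]

theorem solution_foldl (order : List String) (a : Int) :
    order.foldl (fun answer o => if PySem.Str.isIn "latte" o then answer + 5000 else answer + 4500) a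
      = a + priceSum order := by
  induction order generalizing a with
  | nil => simp [priceSum]
  | cons x xs ih =>
    simp only [List.foldl_cons, priceSum, List.map_cons, List.sum_cons, ih]
    split <;> ring

-- ===== VERDICT (by name: the statement is the Claim_ definition above) =====
theorem solution_spec : Claim_equal_solution := by
  intro order _
  unfold Spec_solution solution
  rw [solution_foldl, solution_alt_eq_priceSum]
  ring
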